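-- pv_equiv track=rewrite | github.com/league3236/MyNewAlgorithmStudy | mock_exam.py | solution
-- ===== SOURCE A (Python) =====
-- def solution(answers):
--     answer = []
--     list1 = [1,2,3,4,5]
--     list2 = [2,1,2,3,2,4,2,5]
--     list3 = [3,3,1,1,2,2,4,4,5,5]
--
--     a = 0
--     b = 0
--     c = 0
--
--     for i in range(len(answers)):
--         if(answers[i]==list1[i%len(list1)]):
--             a = a + 1
--     for i in range(len(answers)):
--         if (answers[i] == list2[i % len(list2)]):
--             b = b + 1
--     for i in range(len(answers)):
--         if (answers[i] == list3[i % len(list3)]):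
--             c = c + 1
--     maxs = max(a,b,c)
--     if (a == maxs):
--         answer.append(1)
--     if (b == maxs):
--         answer.append(2)
--     if (c == maxs):
--         answer.append(3)
--
--     return answer
-- ===== SOURCE B (Python) =====
-- def solution(answers):
--     def score(pattern):
--         # walk the answers while cyclically rotating the pattern: the current
--         # expected answer is always the head of the rotation
--         s = 0
--         cyc = pattern
--         for x in answers:
--             if x == cyc[0]:
--                 s += 1
--             cyc = cyc[1:] + cyc[:1]
--         return s
--
--     scores = [score([1, 2, 3, 4, 5]),
--               score([2, 1, 2, 3, 2, 4, 2, 5]),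
--               score([3, 3, 1, 1, 2, 2, 4, 4, 5, 5])]
--     best = max(scores)
--     return [i + 1 for i, s in enumerate(scores) if s == best]
-- ===== Notes on version B (the rewrite author's own statement) =====
-- stated objective: alternative
-- what changed: A indexes each pattern with i % len inside three range(len(answers)) loops; B uses a generic scorer that walks the answers while cyclically rotating a copy of the pattern (no index or modulo arithmetic), collects the three scores in a list, and selects the winners with a comprehension over enumerate(scores).
import Mathlib
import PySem

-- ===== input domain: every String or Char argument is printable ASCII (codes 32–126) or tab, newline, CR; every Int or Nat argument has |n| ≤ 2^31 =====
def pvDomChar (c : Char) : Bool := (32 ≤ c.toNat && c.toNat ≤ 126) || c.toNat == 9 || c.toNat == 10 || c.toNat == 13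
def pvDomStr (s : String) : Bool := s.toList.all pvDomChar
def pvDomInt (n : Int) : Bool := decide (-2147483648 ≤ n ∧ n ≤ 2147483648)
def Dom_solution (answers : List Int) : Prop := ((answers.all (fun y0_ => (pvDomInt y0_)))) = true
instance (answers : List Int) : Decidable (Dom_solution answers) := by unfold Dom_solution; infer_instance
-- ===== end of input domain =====

-- B replaces A's index/modulo loops by a generic rotating-pattern scorer (the expected answer is
-- always the head of a rotated copy of the pattern) and picks the winners by a comprehension.

-- ===== PORT A =====
def solution (answers : List Int) : List Int :=
  let answer : List Int := []
  let list1 : List Int := [1,2,3,4,5]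
  let list2 : List Int := [2,1,2,3,2,4,2,5]
  let list3 : List Int := [3,3,1,1,2,2,4,4,5,5]
  let a : Int := (PySem.List.pyRange 0 (answers.length : Int) 1).foldl
    (fun a i => if PySem.List.pyGetD answers i 0 = PySem.List.pyGetD list1 (PySem.Int.mod i (list1.length : Int)) 0 then a + 1 else a) 0
  let b : Int := (PySem.List.pyRange 0 (answers.length : Int) 1).foldl
    (fun b i => if PySem.List.pyGetD answers i 0 = PySem.List.pyGetD list2 (PySem.Int.mod i (list2.length : Int)) 0 then b + 1 else b) 0
  let c : Int := (PySem.List.pyRange 0 (answers.length : Int) 1).foldl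
    (fun c i => if PySem.List.pyGetD answers i 0 = PySem.List.pyGetD list3 (PySem.Int.mod i (list3.length : Int)) 0 then c + 1 else c) 0
  let maxs := max a (max b c)
  let answer := if a = maxs then answer ++ [1] else answer
  let answer := if b = maxs then answer ++ [2] else answer
  let answer := if c = maxs then answer ++ [3] else answer
  answer

-- ===== PORT B =====
-- Source B's inner `score(pattern)`: one fold over answers carrying (s, cyc);
-- cyc[0] is ported as pyGetD cyc 0 0 (exact: cyc is always a rotation of a nonempty pattern),
-- cyc[1:] + cyc[:1] as slice cyc (some 1) none ++ slice cyc none (some 1).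
def scoreB (answers : List Int) (pattern : List Int) : Int :=
  (answers.foldl
    (fun (st : Int × List Int) x =>
      (if x = PySem.List.pyGetD st.2 0 0 then st.1 + 1 else st.1,
       PySem.List.slice st.2 (some 1) none ++ PySem.List.slice st.2 none (some 1)))
    (0, pattern)).1

def solution_alt (answers : List Int) : List Int :=
  let scores : List Int :=
    [scoreB answers [1,2,3,4,5],
     scoreB answers [2,1,2,3,2,4,2,5],
     scoreB answers [3,3,1,1,2,2,4,4,5,5]]
  let best : Int := (PySem.List.max? scores id).getD 0   -- max(scores); scores is a nonempty literal list
  (PySem.List.enumerate scores 0).foldl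
    (fun acc p => if p.2 = best then acc ++ [p.1 + 1] else acc) []

-- ===== PRECONDITION & SPEC =====
def Spec_solution (answers : List Int) (out : List Int) : Prop := out = solution_alt answers
instance (answers : List Int) (out : List Int) : Decidable (Spec_solution answers out) := by unfold Spec_solution; infer_instance

-- ===== CLAIM (what is proved, stated in full; the proofs are below) =====
def Claim_equal_solution : Prop := ∀ (answers : List Int), Dom_solution answers → Spec_solution answers (solution answers)

-- ===== LEMMAS AND PROOFS =====

-- every pair produced by enumerate pairs an index with the element at that index
theorem mem_enumerate_spec (xs : List Int) :
    ∀ (s : Int) (p : Int × Int), p ∈ PySem.List.enumerate xs s →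
      ∃ k : Nat, p.1 = s + k ∧ xs[k]? = some p.2 := by
  induction xs with
  | nil => intro s p hp; simp [PySem.List.enumerate] at hp
  | cons x xs ih =>
    intro s p hp
    rw [PySem.List.enumerate_cons] at hp
    rcases List.mem_cons.mp hp with h | h
    · exact ⟨0, by simp [h], by simp [h]⟩
    · obtain ⟨k, hk1, hk2⟩ := ih (s + 1) p h
      exact ⟨k + 1, by push_cast; omega, by simpa using hk2⟩

theorem pyGetD_of_mem_enumerate (xs : List Int) (p : Int × Int)
    (hp : p ∈ PySem.List.enumerate xs 0) : PySem.List.pyGetD xs p.1 0 = p.2 := by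
  obtain ⟨k, hk1, hk2⟩ := mem_enumerate_spec xs 0 p hp
  have hk : k < xs.length := by
    by_contra h
    rw [List.getElem?_eq_none (by omega)] at hk2
    simp at hk2
  rw [hk1, zero_add, PySem.List.pyGetD_eq_getElem xs 0 (by positivity) (by exact_mod_cast hk)]
  simp only [Int.toNat_natCast]
  rw [List.getElem?_eq_getElem hk] at hk2
  exact Option.some.inj hk2

-- A's counter loop over range(len(answers)) equals the corresponding fold over enumerate
theorem count_loop_eq (answers L : List Int) (m : Int) :
    (PySem.List.pyRange 0 (answers.length : Int) 1).foldl
      (fun a i => if PySem.List.pyGetD answers i 0 = PySem.List.pyGetD L (PySem.Int.mod i m) 0 then a + 1 else a) (0 : Int)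
    = (PySem.List.enumerate answers 0).foldl
      (fun a p => if p.2 = PySem.List.pyGetD L (PySem.Int.mod p.1 m) 0 then a + 1 else a) (0 : Int) := by
  have h := PySem.List.map_fst_enumerate answers 0
  rw [zero_add] at h
  rw [← h, List.foldl_map]
  apply PySem.List.foldl_congr_mem
  intro acc p hp
  rw [pyGetD_of_mem_enumerate answers p hp]

-- rotating one step = slice [1:] ++ slice [:1]
theorem rotate_step (l : List Int) :
    PySem.List.slice l (some 1) none ++ PySem.List.slice l none (some 1) = l.rotate 1 := by
  rw [PySem.List.slice_from_one, PySem.List.slice_to l (by norm_num)]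
  cases l with
  | nil => simp
  | cons a t => rw [List.rotate_eq_drop_append_take (by simp)]; simp

-- head of a rotation is the element at the rotation offset mod length
theorem head_rotate (L : List Int) (hL : L ≠ []) (k : Nat) :
    PySem.List.pyGetD (L.rotate k) 0 0 = PySem.List.pyGetD L (PySem.Int.mod (k : Int) (L.length : Int)) 0 := by
  have hlen : 0 < L.length := List.length_pos_iff.mpr hL
  have hkm : k % L.length < L.length := Nat.mod_lt _ hlen
  rw [PySem.Int.mod_natCast,
      PySem.List.pyGetD_eq_getElem (L.rotate k) (i := 0) 0 (by norm_num) (by simpa using hlen),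
      PySem.List.pyGetD_eq_getElem L (i := ((k % L.length : Nat) : Int)) 0 (by positivity) (by exact_mod_cast hkm)]
  simp only [Int.toNat_natCast, Int.toNat_zero]
  rw [List.getElem_rotate]
  simp

-- B's rotating scorer, started at rotation offset k, equals A's modulo-indexed count over enumerate
theorem scoreB_rotate_eq (L : List Int) (hL : L ≠ []) :
    ∀ (xs : List Int) (k : Nat) (s : Int),
      (xs.foldl
        (fun (st : Int × List Int) x =>
          (if x = PySem.List.pyGetD st.2 0 0 then st.1 + 1 else st.1,
           PySem.List.slice st.2 (some 1) none ++ PySem.List.slice st.2 none (some 1)))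
        (s, L.rotate k)).1
      = (PySem.List.enumerate xs (k : Int)).foldl
          (fun a p => if p.2 = PySem.List.pyGetD L (PySem.Int.mod p.1 (L.length : Int)) 0 then a + 1 else a) s := by
  intro xs
  induction xs with
  | nil => intro k s; simp [PySem.List.enumerate]
  | cons x t ih =>
    intro k s
    rw [PySem.List.enumerate_cons]
    simp only [List.foldl_cons]
    rw [rotate_step (L.rotate k), List.rotate_rotate, head_rotate L hL k]
    have : ((k : Int) + 1) = ((k + 1 : Nat) : Int) := by push_cast; ring
    rw [this, ← ih (k + 1)]

theorem scoreB_eq (answers L : List Int) (hL : L ≠ []) :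
    scoreB answers L
      = (PySem.List.pyRange 0 (answers.length : Int) 1).foldl
          (fun a i => if PySem.List.pyGetD answers i 0 = PySem.List.pyGetD L (PySem.Int.mod i (L.length : Int)) 0 then a + 1 else a) 0 := by
  rw [count_loop_eq]
  have h := scoreB_rotate_eq L hL answers 0 0
  simpa [scoreB] using h

-- A's tail (three conditional appends against max a (max b c)) equals B's tail
-- (comprehension over enumerate([a,b,c]) against max(scores)), for any scores a b c
theorem tail_eq (a b c : Int) :
    (let maxs := max a (max b c)
     let ans0 : List Int := []
     let ans1 := if a = maxs then ans0 ++ [1] else ans0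
     let ans2 := if b = maxs then ans1 ++ [2] else ans1
     if c = maxs then ans2 ++ [3] else ans2)
    = (PySem.List.enumerate [a, b, c] 0).foldl
        (fun acc p => if p.2 = (PySem.List.max? [a, b, c] id).getD 0 then acc ++ [p.1 + 1] else acc) [] := by
  have hm : (PySem.List.max? [a, b, c] id).getD 0 = max a (max b c) := by
    simp only [PySem.List.max?, List.foldl_cons, List.foldl_nil, id]
    by_cases h1 : a < b
    · simp only [if_pos h1]
      by_cases h2 : b < c <;> simp [h2, max_def] <;> omega
    · simp only [if_neg h1]
      by_cases h2 : a < c <;> simp [h2, max_def] <;> omega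
  simp only [hm, PySem.List.enumerate, List.foldl_cons, List.foldl_nil]
  split_ifs <;> norm_num

-- ===== VERDICT (by name: the statement is the Claim_ definition above) =====
theorem solution_spec : Claim_equal_solution := by
  intro answers _
  unfold Spec_solution
  simp only [solution, solution_alt,
    scoreB_eq answers [1,2,3,4,5] (by simp),
    scoreB_eq answers [2,1,2,3,2,4,2,5] (by simp),
    scoreB_eq answers [3,3,1,1,2,2,4,4,5,5] (by simp)]
  exact tail_eq _ _ _
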